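-- pv_equiv track=rewrite | github.com/bobowedge/advent-of-code-2023 | day17.py | heat_loss
-- ===== SOURCE A (Python) =====
-- import heapq
--
-- def heat_loss(heat_map, start, end, min_move, max_move):
--     queue = [(0, *start, 0, 0)]
--     seen = set()
--
--     all_dirs = {(1, 0), (-1, 0), (0, 1), (0, -1)}
--     while len(queue) > 0:
--         heat, x, y, dir1, dir2 = heapq.heappop(queue)
--         if (x, y) == end:
--             return heat
--         if (x, y, dir1, dir2) in seen:
--             continue
--         seen.add((x, y, dir1, dir2))
--         not_turns = {(dir1, dir2), (-dir1, -dir2)}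
--         for dx, dy in all_dirs.difference(not_turns):
--             new_x = x
--             new_y = y
--             new_heat = heat
--             for i in range(1, max_move + 1):
--                 new_x += dx
--                 new_y += dy
--                 if (new_x, new_y) in heat_map:
--                     new_heat += heat_map[(new_x, new_y)]
--                     if i >= min_move:
--                         heapq.heappush(queue, (new_heat, new_x, new_y, dx, dy))
-- ===== SOURCE B (Python) =====
-- def heat_loss(heat_map, start, end, min_move, max_move):
--     # Saturation instead of a priority queue: keep a grow-only candidate set and a
--     # seen set; each round recompute the frontier (candidates in unseen states) and
--     # select its least entry -- no heap, no deletion, successors via prefix sums.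
--     dirs = [(1, 0), (-1, 0), (0, 1), (0, -1)]
--
--     def succs(heat, x, y, d1, d2):
--         out = []
--         for dx, dy in dirs:
--             if (dx, dy) == (d1, d2) or (dx, dy) == (-d1, -d2):
--                 continue
--             cells = [(x + i * dx, y + i * dy) for i in range(1, max_move + 1)]
--             pref = []
--             run = heat
--             for c in cells:
--                 run += heat_map.get(c, 0)
--                 pref.append(run)
--             out.extend((p, c[0], c[1], dx, dy)
--                        for i, (c, p) in enumerate(zip(cells, pref), 1)
--                        if c in heat_map and i >= min_move)
--         return out
--
--     cand = {(0, start[0], start[1], 0, 0)}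
--     seen = set()
--     while True:
--         frontier = [e for e in cand if e[1:] not in seen]
--         if not frontier:
--             return None
--         m = min(frontier)
--         if (m[1], m[2]) == end:
--             return m[0]
--         seen.add(m[1:])
--         cand.update(succs(*m))
-- ===== Notes on version B (the rewrite author's own statement) =====
-- stated objective: alternative
-- what changed: B replaces A's heap-based Dijkstra (mutable priority queue with pops and pushes) by a saturation loop over a grow-only candidate set: each round it recomputes the frontier of candidates whose state is unseen, selects its minimum, and unions in that entry's successors (generated via prefix sums over the straight run) -- no heap, no deletion.
import Mathlib
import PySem

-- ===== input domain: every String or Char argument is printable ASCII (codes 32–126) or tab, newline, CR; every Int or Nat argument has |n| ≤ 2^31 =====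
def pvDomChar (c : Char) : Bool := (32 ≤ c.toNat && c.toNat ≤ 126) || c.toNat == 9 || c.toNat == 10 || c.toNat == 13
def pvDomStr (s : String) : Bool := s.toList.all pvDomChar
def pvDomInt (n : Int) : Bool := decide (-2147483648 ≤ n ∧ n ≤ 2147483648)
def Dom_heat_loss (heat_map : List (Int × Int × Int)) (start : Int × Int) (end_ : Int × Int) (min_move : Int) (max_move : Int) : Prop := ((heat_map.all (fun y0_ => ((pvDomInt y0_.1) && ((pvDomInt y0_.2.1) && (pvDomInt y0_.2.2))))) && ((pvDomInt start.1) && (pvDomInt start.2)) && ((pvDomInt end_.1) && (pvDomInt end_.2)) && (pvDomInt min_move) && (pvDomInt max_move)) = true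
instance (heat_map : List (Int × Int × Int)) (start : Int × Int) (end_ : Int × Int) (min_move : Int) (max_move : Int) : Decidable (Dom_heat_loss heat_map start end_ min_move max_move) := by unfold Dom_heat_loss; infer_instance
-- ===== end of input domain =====

-- B replaces A's heap-based Dijkstra by a saturation loop over a grow-only candidate set (no
-- priority queue, no deletions; successors via prefix sums); objective: alternative, no speed
-- claim. Equivalence is about the return value; neither program mutates its arguments.

-- ===== PORT A =====
-- Shared by both ports: the dict lookup heat_map[(x,y)] on the association list (first match, per
-- the type convention), the fixed list of the four directions (Python iterates a SET of
-- directions; that order is unobservable in the result — only the collection of generated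
-- entries matters — so a fixed order is exact), Python's '<' on the 5-tuples, and the running
-- minimum of a nonempty collection of such tuples (heapq's pop / builtin min: the least VALUE,
-- which is order-independent since the order is total).
def hmGet? (hm : List (Int × Int × Int)) (x y : Int) : Option Int :=
  match hm with
  | [] => none
  | (a, b, h) :: t => if a = x ∧ b = y then some h else hmGet? t x y

def dirsAll : List (Int × Int) := [(1, 0), (-1, 0), (0, 1), (0, -1)]

def tupLt (a b : Int × Int × Int × Int × Int) : Bool :=
  decide (a.1 < b.1 ∨ (a.1 = b.1 ∧ (a.2.1 < b.2.1 ∨ (a.2.1 = b.2.1 ∧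
    (a.2.2.1 < b.2.2.1 ∨ (a.2.2.1 = b.2.2.1 ∧ (a.2.2.2.1 < b.2.2.2.1 ∨
      (a.2.2.2.1 = b.2.2.2.1 ∧ a.2.2.2.2 < b.2.2.2.2))))))))

def minTup (h : Int × Int × Int × Int × Int) (t : List (Int × Int × Int × Int × Int)) :
    Int × Int × Int × Int × Int :=
  t.foldl (fun m z => if tupLt z m then z else m) h

-- A's inner 'for i in range(1, max_move+1)' body: state (new_x, new_y, new_heat, queue).
def stepA (hm : List (Int × Int × Int)) (mn dx dy : Int)
    (st : Int × Int × Int × List (Int × Int × Int × Int × Int)) (i : Int) :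
    Int × Int × Int × List (Int × Int × Int × Int × Int) :=
  let nx := st.1 + dx
  let ny := st.2.1 + dy
  match hmGet? hm nx ny with
  | some hv =>
      (nx, ny, st.2.2.1 + hv,
        if mn ≤ i then st.2.2.2 ++ [(st.2.2.1 + hv, nx, ny, dx, dy)] else st.2.2.2)
  | none => (nx, ny, st.2.2.1, st.2.2.2)

def expandA (hm : List (Int × Int × Int)) (mn mx heat x y dx dy : Int)
    (qq : List (Int × Int × Int × Int × Int)) : List (Int × Int × Int × Int × Int) :=
  ((PySem.List.pyRange 1 (mx + 1) 1).foldl (stepA hm mn dx dy) (x, y, heat, qq)).2.2.2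

-- Fuel for the while loops (shared bookkeeping, not part of either algorithm): at most
-- 1 + 4*|hm| distinct states exist and each expansion enqueues at most 4*max_move entries.
def pvFuel (hm : List (Int × Int × Int)) (mx : Int) : Nat :=
  2 + 4 * hm.length + (1 + 4 * hm.length) * (4 * mx.toNat)

-- A's while loop: pop the least tuple of the queue multiset (heappop), return / skip / expand.
def loopA (hm : List (Int × Int × Int)) (end_ : Int × Int) (mn mx : Int) :
    Nat → List (Int × Int × Int × Int × Int) → List (Int × Int × Int × Int) → Option Int
  | 0, _, _ => none
  | fuel + 1, q, seen =>
    match q with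
    | [] => none
    | h :: t =>
      let m := minTup h t
      let rest := (h :: t).erase m
      if (m.2.1, m.2.2.1) = end_ then some m.1
      else if PySem.Set.contains seen (m.2.1, m.2.2.1, m.2.2.2.1, m.2.2.2.2) then
        loopA hm end_ mn mx fuel rest seen
      else
        loopA hm end_ mn mx fuel
          ((dirsAll.filter (fun d =>
              !(d == (m.2.2.2.1, m.2.2.2.2) || d == (-m.2.2.2.1, -m.2.2.2.2)))).foldl
            (fun qq d => expandA hm mn mx m.1 m.2.1 m.2.2.1 d.1 d.2 qq) rest)
          (PySem.Set.add seen (m.2.1, m.2.2.1, m.2.2.2.1, m.2.2.2.2))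

def heat_loss (heat_map : List (Int × Int × Int)) (start : Int × Int) (end_ : Int × Int) (min_move : Int) (max_move : Int) : Option Int :=
  loopA heat_map end_ min_move max_move (pvFuel heat_map max_move)
    [(0, start.1, start.2, 0, 0)] PySem.Set.empty

-- ===== PORT B =====
-- Source B's running prefix sums ('run += …; pref.append(run)'; append modelled as cons + reverse).
def accumB (t : Int) (l : List Int) : List Int :=
  (l.foldl (fun p g => (p.1 + g, (p.1 + g) :: p.2)) (t, ([] : List Int))).2.reverse

-- Source B's per-direction successor comprehension.
def entriesB (hm : List (Int × Int × Int)) (mn mx heat x y dx dy : Int) :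
    List (Int × Int × Int × Int × Int) :=
  let is := PySem.List.pyRange 1 (mx + 1) 1
  let cells := is.map (fun i => (x + i * dx, y + i * dy))
  let pref := accumB heat (cells.map (fun c => (hmGet? hm c.1 c.2).getD 0))
  (is.zip (cells.zip pref)).filterMap (fun t =>
    if (hmGet? hm t.2.1.1 t.2.1.2).isSome ∧ mn ≤ t.1 then
      some (t.2.2, t.2.1.1, t.2.1.2, dx, dy)
    else none)

-- Source B's succs(*m): loop over the four directions, skipping straight-on and reverse.
def succsB (hm : List (Int × Int × Int)) (mn mx : Int) (m : Int × Int × Int × Int × Int) :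
    List (Int × Int × Int × Int × Int) :=
  dirsAll.foldl (fun out d =>
    if d == (m.2.2.2.1, m.2.2.2.2) || d == (-m.2.2.2.1, -m.2.2.2.2) then out
    else out ++ entriesB hm mn mx m.1 m.2.1 m.2.2.1 d.1 d.2) []

-- Source B's while loop: recompute the frontier, take its min, return / saturate.
def loopB (hm : List (Int × Int × Int)) (end_ : Int × Int) (mn mx : Int) :
    Nat → PySem.Set (Int × Int × Int × Int × Int) → PySem.Set (Int × Int × Int × Int) → Option Int
  | 0, _, _ => none
  | fuel + 1, cand, seen =>
    match cand.filter (fun e => !PySem.Set.contains seen (e.2.1, e.2.2.1, e.2.2.2.1, e.2.2.2.2)) with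
    | [] => none
    | h :: t =>
      let m := minTup h t
      if (m.2.1, m.2.2.1) = end_ then some m.1
      else loopB hm end_ mn mx fuel
        (PySem.Set.update cand (succsB hm mn mx m))
        (PySem.Set.add seen (m.2.1, m.2.2.1, m.2.2.2.1, m.2.2.2.2))

def heat_loss_alt (heat_map : List (Int × Int × Int)) (start : Int × Int) (end_ : Int × Int) (min_move : Int) (max_move : Int) : Option Int :=
  loopB heat_map end_ min_move max_move (pvFuel heat_map max_move)
    (PySem.Set.ofList [(0, start.1, start.2, 0, 0)]) PySem.Set.empty

-- ===== PRECONDITION & SPEC =====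
def Spec_heat_loss (heat_map : List (Int × Int × Int)) (start : Int × Int) (end_ : Int × Int) (min_move : Int) (max_move : Int) (out : Option Int) : Prop := out = heat_loss_alt heat_map start end_ min_move max_move
instance (heat_map : List (Int × Int × Int)) (start : Int × Int) (end_ : Int × Int) (min_move : Int) (max_move : Int) (out : Option Int) : Decidable (Spec_heat_loss heat_map start end_ min_move max_move out) := by unfold Spec_heat_loss; infer_instance

-- ===== CLAIM (what is proved, stated in full; the proofs are below) =====
def Claim_equal_heat_loss : Prop := ∀ (heat_map : List (Int × Int × Int)) (start : Int × Int) (end_ : Int × Int) (min_move : Int) (max_move : Int), Dom_heat_loss heat_map start end_ min_move max_move → Spec_heat_loss heat_map start end_ min_move max_move (heat_loss heat_map start end_ min_move max_move)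

-- ===== LEMMAS AND PROOFS =====

-- order facts about the lexicographic comparison
theorem tupLt_irrefl (a : Int × Int × Int × Int × Int) : tupLt a a = false := by
  obtain ⟨a1, a2, a3, a4, a5⟩ := a; simp [tupLt]

theorem tupLt_trans {a b c : Int × Int × Int × Int × Int}
    (h1 : tupLt a b = true) (h2 : tupLt b c = true) : tupLt a c = true := by
  obtain ⟨a1, a2, a3, a4, a5⟩ := a; obtain ⟨b1, b2, b3, b4, b5⟩ := b
  obtain ⟨c1, c2, c3, c4, c5⟩ := c
  simp only [tupLt, decide_eq_true_eq] at *; omega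

theorem tupLt_eq_of_not {a b : Int × Int × Int × Int × Int}
    (h1 : tupLt a b = false) (h2 : tupLt b a = false) : a = b := by
  obtain ⟨a1, a2, a3, a4, a5⟩ := a; obtain ⟨b1, b2, b3, b4, b5⟩ := b
  simp only [tupLt, decide_eq_false_iff_not, Prod.mk.injEq] at *; omega

theorem tupLt_of_not_of_lt {a b c : Int × Int × Int × Int × Int}
    (h1 : tupLt b a = false) (h2 : tupLt b c = true) : tupLt a c = true := by
  obtain ⟨a1, a2, a3, a4, a5⟩ := a; obtain ⟨b1, b2, b3, b4, b5⟩ := b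
  obtain ⟨c1, c2, c3, c4, c5⟩ := c
  simp only [tupLt, decide_eq_true_eq, decide_eq_false_iff_not] at *; omega

-- minTup is a member and a minimum, and is determined by those two facts
theorem minTup_mem (h : Int × Int × Int × Int × Int) (t : List (Int × Int × Int × Int × Int)) :
    minTup h t ∈ h :: t := by
  induction t generalizing h with
  | nil => simp [minTup]
  | cons z t ih =>
    show minTup (if tupLt z h then z else h) t ∈ h :: z :: t
    by_cases hc : tupLt z h = true
    · rw [if_pos hc]
      rcases List.mem_cons.1 (ih z) with h1 | h1
      · simp [h1]
      · simp [h1]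
    · rw [if_neg hc]
      rcases List.mem_cons.1 (ih h) with h1 | h1
      · simp [h1]
      · simp [h1]

theorem minTup_le (h : Int × Int × Int × Int × Int) (t : List (Int × Int × Int × Int × Int)) :
    ∀ z ∈ h :: t, tupLt z (minTup h t) = false := by
  induction t generalizing h with
  | nil => intro z hz; simp at hz; subst hz; exact tupLt_irrefl _
  | cons w t ih =>
    intro z hz
    have hstep : minTup h (w :: t) = minTup (if tupLt w h then w else h) t := rfl
    rw [hstep]
    by_cases hw : tupLt w h = true
    · rw [if_pos hw]
      have hmin : tupLt w (minTup w t) = false := ih w w List.mem_cons_self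
      rcases List.mem_cons.1 hz with heq | hz'
      · subst heq
        cases hc : tupLt z (minTup w t) with
        | false => rfl
        | true => exact absurd (tupLt_trans hw hc) (by simp [hmin])
      · rcases List.mem_cons.1 hz' with heq | hz''
        · subst heq; exact hmin
        · exact ih w z (List.mem_cons_of_mem _ hz'')
    · rw [if_neg hw]
      have hwh : tupLt w h = false := by simpa using hw
      have hmin : tupLt h (minTup h t) = false := ih h h List.mem_cons_self
      rcases List.mem_cons.1 hz with heq | hz'
      · subst heq; exact hmin
      · rcases List.mem_cons.1 hz' with heq | hz''
        · subst heq
          cases hc : tupLt z (minTup h t) with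
          | false => rfl
          | true => exact absurd (tupLt_of_not_of_lt hwh hc) (by simp [hmin])
        · exact ih h z (List.mem_cons_of_mem _ hz'')

theorem minTup_eq {m h : Int × Int × Int × Int × Int} {t : List (Int × Int × Int × Int × Int)}
    (hmem : m ∈ h :: t) (hle : ∀ z ∈ h :: t, tupLt z m = false) : minTup h t = m :=
  tupLt_eq_of_not (hle _ (minTup_mem h t)) (minTup_le h t m hmem)

-- the range 1..n of the inner loops, as a Nat-indexed list (proof helper)
def rngI (n : Nat) : List Int := (List.range n).map (fun k : Nat => ((1 : Int) + (k : Int)))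

theorem rngI_succ (n : Nat) : rngI (n + 1) = rngI n ++ [(1 : Int) + n] := by
  simp [rngI, List.range_succ]

theorem pyRange_as (mx : Int) : PySem.List.pyRange 1 (mx + 1) 1 = rngI mx.toNat := by
  rw [PySem.List.pyRange_one]; unfold rngI
  have h : mx + 1 - 1 = mx := by ring
  rw [h]

-- total heat gained over the first n straight cells
def Sg (hm : List (Int × Int × Int)) (x y dx dy : Int) (n : Nat) : Int :=
  (((rngI n).map (fun i => (x + i * dx, y + i * dy))).map
    (fun c => (hmGet? hm c.1 c.2).getD 0)).sum

-- naive form of accumB, used only by the proofs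
def accumN (t : Int) : List Int → List Int
  | [] => []
  | g :: r => (t + g) :: accumN (t + g) r

theorem accumB_go (l : List Int) : ∀ (t : Int) (acc : List Int),
    (l.foldl (fun p g => (p.1 + g, (p.1 + g) :: p.2)) (t, acc)).2.reverse =
      acc.reverse ++ accumN t l := by
  induction l with
  | nil => intro t acc; simp [accumN]
  | cons g r ih =>
    intro t acc
    simp only [List.foldl_cons, accumN]
    rw [ih]
    simp

theorem accumB_eq_accumN (t : Int) (l : List Int) : accumB t l = accumN t l := by
  unfold accumB
  rw [accumB_go]
  simp

theorem accumN_length (l : List Int) : ∀ t, (accumN t l).length = l.length := by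
  induction l with
  | nil => intro t; rfl
  | cons g r ih => intro t; simp [accumN, ih]

theorem accumN_append (l : List Int) : ∀ t g,
    accumN t (l ++ [g]) = accumN t l ++ [t + l.sum + g] := by
  induction l with
  | nil => intro t g; simp [accumN]
  | cons h r ih =>
    intro t g
    simp only [List.cons_append, accumN, ih, List.sum_cons]
    have h : t + h + r.sum + g = t + (h + r.sum) + g := by ring
    rw [h]

-- B's per-direction entry list, over the Nat-indexed range
def Eg (hm : List (Int × Int × Int)) (mn heat x y dx dy : Int) (n : Nat) :
    List (Int × Int × Int × Int × Int) :=
  let is := rngI n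
  let cells := is.map (fun i => (x + i * dx, y + i * dy))
  let pref := accumN heat (cells.map (fun c => (hmGet? hm c.1 c.2).getD 0))
  (is.zip (cells.zip pref)).filterMap (fun t =>
    if (hmGet? hm t.2.1.1 t.2.1.2).isSome ∧ mn ≤ t.1 then
      some (t.2.2, t.2.1.1, t.2.1.2, dx, dy)
    else none)

theorem entriesB_eq_Eg (hm : List (Int × Int × Int)) (mn mx heat x y dx dy : Int) :
    entriesB hm mn mx heat x y dx dy = Eg hm mn heat x y dx dy mx.toNat := by
  unfold entriesB Eg; rw [pyRange_as]; simp only [accumB_eq_accumN]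

theorem Sg_succ (hm : List (Int × Int × Int)) (x y dx dy : Int) (n : Nat) :
    Sg hm x y dx dy (n + 1) =
      Sg hm x y dx dy n +
        (hmGet? hm (x + (1 + (n : Int)) * dx) (y + (1 + (n : Int)) * dy)).getD 0 := by
  simp [Sg, rngI, List.range_succ]

theorem Eg_succ (hm : List (Int × Int × Int)) (mn heat x y dx dy : Int) (n : Nat) :
    Eg hm mn heat x y dx dy (n + 1) =
      Eg hm mn heat x y dx dy n ++
        (if (hmGet? hm (x + (1 + (n : Int)) * dx) (y + (1 + (n : Int)) * dy)).isSome ∧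
            mn ≤ 1 + (n : Int) then
          [(heat + Sg hm x y dx dy n +
              (hmGet? hm (x + (1 + (n : Int)) * dx) (y + (1 + (n : Int)) * dy)).getD 0,
            x + (1 + (n : Int)) * dx, y + (1 + (n : Int)) * dy, dx, dy)]
        else []) := by
  simp only [Eg]
  rw [rngI_succ]
  simp only [List.map_append, List.map_cons, List.map_nil]
  rw [accumN_append]
  rw [List.zip_append (by simp [accumN_length]),
      List.zip_append (by simp [accumN_length, List.length_zip, rngI])]
  rw [List.filterMap_append]
  congr 1
  by_cases hc : (hmGet? hm (x + (1 + (n : Int)) * dx) (y + (1 + (n : Int)) * dy)).isSome = true ∧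
      mn ≤ 1 + (n : Int)
  · simp [Sg, hc]
  · simp [Sg, hc]

theorem stepA_fold (hm : List (Int × Int × Int)) (mn dx dy x y heat : Int) :
    ∀ (n : Nat) (qq : List (Int × Int × Int × Int × Int)),
      (rngI n).foldl (stepA hm mn dx dy) (x, y, heat, qq) =
        (x + n * dx, y + n * dy, heat + Sg hm x y dx dy n,
          qq ++ Eg hm mn heat x y dx dy n) := by
  intro n
  induction n with
  | zero => intro qq; simp [rngI, Sg, Eg]
  | succ n ih =>
    intro qq
    rw [rngI_succ, List.foldl_append, ih, List.foldl_cons, List.foldl_nil]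
    have hx : x + (n : Int) * dx + dx = x + (1 + (n : Int)) * dx := by ring
    have hy : y + (n : Int) * dy + dy = y + (1 + (n : Int)) * dy := by ring
    simp only [stepA]
    simp only [hx, hy]
    rw [Eg_succ, Sg_succ]
    cases hg : hmGet? hm (x + (1 + (n : Int)) * dx) (y + (1 + (n : Int)) * dy) with
    | none =>
      simp only [hg, Option.getD_none, Option.isSome_none, Bool.false_eq_true, false_and,
        if_false, List.append_nil, Prod.mk.injEq]
      and_intros <;> first | trivial | rw [List.append_assoc] | (push_cast; ring) | simp
    | some hv =>
      simp only [hg, Option.getD_some, Option.isSome_some, true_and, Prod.mk.injEq]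
      by_cases hmn : mn ≤ 1 + (n : Int)
      · simp only [if_pos hmn]
        and_intros <;> first | trivial | rw [List.append_assoc] | (push_cast; ring) | simp
      · simp only [if_neg hmn]
        and_intros <;> first | trivial | rw [List.append_assoc] | (push_cast; ring) | simp

theorem expandA_entriesB (hm : List (Int × Int × Int)) (mn mx heat x y dx dy : Int)
    (qq : List (Int × Int × Int × Int × Int)) :
    expandA hm mn mx heat x y dx dy qq = qq ++ entriesB hm mn mx heat x y dx dy := by
  unfold expandA
  rw [pyRange_as, stepA_fold, entriesB_eq_Eg]

theorem foldl_expandA (hm : List (Int × Int × Int)) (mn mx heat x y : Int) :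
    ∀ (ds : List (Int × Int)) (q : List (Int × Int × Int × Int × Int)),
      ds.foldl (fun qq d => expandA hm mn mx heat x y d.1 d.2 qq) q =
        q ++ ds.flatMap (fun d => entriesB hm mn mx heat x y d.1 d.2) := by
  intro ds
  induction ds with
  | nil => intro q; simp
  | cons d ds ih =>
    intro q
    rw [List.foldl_cons, expandA_entriesB, ih]
    simp [List.append_assoc]

-- Source B's direction loop (skip / extend) as filter + flatMap
theorem foldl_skip_append {a b : Type} (P : a -> Bool) (f : a -> List b) :
    ∀ (ds : List a) (acc : List b),
      ds.foldl (fun out d => if P d then out else out ++ f d) acc =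
        acc ++ (ds.filter (fun d => !P d)).flatMap f := by
  intro ds
  induction ds with
  | nil => intro acc; simp
  | cons d ds ih =>
    intro acc
    rw [List.foldl_cons]
    cases hp : P d with
    | true => rw [if_pos rfl, ih]; simp [List.filter_cons, hp]
    | false => rw [if_neg (by simp), ih]; simp [List.filter_cons, hp, List.append_assoc]

theorem succsB_eq (hm : List (Int × Int × Int)) (mn mx : Int)
    (m : Int × Int × Int × Int × Int) :
    succsB hm mn mx m =
      (dirsAll.filter (fun d =>
          !(d == (m.2.2.2.1, m.2.2.2.2) || d == (-m.2.2.2.1, -m.2.2.2.2)))).flatMap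
        (fun d => entriesB hm mn mx m.1 m.2.1 m.2.2.1 d.1 d.2) := by
  unfold succsB
  rw [foldl_skip_append]
  simp

-- successful lookups name a key of the map
theorem hmGet?_mem {hm : List (Int × Int × Int)} {x y v : Int}
    (hg : hmGet? hm x y = some v) : ∃ h : Int, (x, y, h) ∈ hm := by
  induction hm with
  | nil => simp [hmGet?] at hg
  | cons c t ih =>
    obtain ⟨a, b, hh⟩ := c
    rw [hmGet?] at hg
    by_cases hc : a = x ∧ b = y
    · refine ⟨hh, ?_⟩
      rw [← hc.1, ← hc.2]
      exact List.mem_cons_self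
    · rw [if_neg hc] at hg
      obtain ⟨h, hmem⟩ := ih hg
      exact ⟨h, List.mem_cons_of_mem _ hmem⟩

-- every state any entry can carry
def allStates (hm : List (Int × Int × Int)) (start : Int × Int) :
    List (Int × Int × Int × Int) :=
  (start.1, start.2, 0, 0) :: hm.flatMap (fun c => dirsAll.map (fun d => (c.1, c.2.1, d.1, d.2)))

theorem state_mem_allStates {hm : List (Int × Int × Int)} (start : Int × Int)
    {cx cy dx dy v : Int} (hg : hmGet? hm cx cy = some v) (hd : (dx, dy) ∈ dirsAll) :
    (cx, cy, dx, dy) ∈ allStates hm start := by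
  obtain ⟨h, hmem⟩ := hmGet?_mem hg
  exact List.mem_cons_of_mem _
    (List.mem_flatMap.2 ⟨(cx, cy, h), hmem, List.mem_map.2 ⟨(dx, dy), hd, rfl⟩⟩)

theorem mem_entriesB {hm : List (Int × Int × Int)} {mn mx heat x y dx dy : Int}
    {e : Int × Int × Int × Int × Int} (he : e ∈ entriesB hm mn mx heat x y dx dy) :
    (hmGet? hm e.2.1 e.2.2.1).isSome = true ∧ e.2.2.2 = (dx, dy) := by
  simp only [entriesB] at he
  rw [List.mem_filterMap] at he
  obtain ⟨t, _, hft⟩ := he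
  by_cases hc : (hmGet? hm t.2.1.1 t.2.1.2).isSome = true ∧ mn ≤ t.1
  · rw [if_pos hc] at hft
    cases hft
    exact ⟨hc.1, rfl⟩
  · rw [if_neg hc] at hft
    exact absurd hft (by simp)

-- size bookkeeping for the fuel
theorem flat_bound {a b : Type} (ds : List a) (f : a -> List b) (k : Nat)
    (hk : ∀ d ∈ ds, (f d).length ≤ k) : (ds.flatMap f).length ≤ ds.length * k := by
  induction ds with
  | nil => simp
  | cons d ds ih =>
    rw [List.flatMap_cons, List.length_append, List.length_cons, Nat.succ_mul]
    have h1 := hk d List.mem_cons_self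
    have h2 := ih (fun d hd => hk d (List.mem_cons_of_mem _ hd))
    omega

theorem length_entriesB_le (hm : List (Int × Int × Int)) (mn mx heat x y dx dy : Int) :
    (entriesB hm mn mx heat x y dx dy).length ≤ mx.toNat := by
  unfold entriesB
  refine le_trans (List.length_filterMap_le _ _) ?_
  rw [List.length_zip, pyRange_as]
  have h : (rngI mx.toNat).length = mx.toNat := by simp [rngI]
  omega

-- Set.contains through add
theorem contains_add_eq {a : Type} [BEq a] [LawfulBEq a] (s : PySem.Set a) (x y : a) :
    PySem.Set.contains (PySem.Set.add s x) y = (PySem.Set.contains s y || y == x) := by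
  by_cases hmem : y ∈ PySem.Set.add s x
  · rw [(PySem.Set.contains_iff _ _).2 hmem]
    rcases (PySem.Set.mem_add s x y).1 hmem with h | h
    · rw [(PySem.Set.contains_iff _ _).2 h]; rfl
    · subst h; simp
  · have h1 : PySem.Set.contains (PySem.Set.add s x) y = false := by
      rw [← Bool.not_eq_true, PySem.Set.contains_iff]; exact hmem
    have h3 : PySem.Set.contains s y = false := by
      rw [← Bool.not_eq_true, PySem.Set.contains_iff]
      exact fun h => hmem ((PySem.Set.mem_add s x y).2 (Or.inl h))
    have h4 : (y == x) = false := by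
      rw [beq_eq_false_iff_ne]
      exact fun h => hmem ((PySem.Set.mem_add s x y).2 (Or.inr h))
    rw [h1, h3, h4]; rfl

-- the number of not-yet-seen states, the measure the fuels are compared against
def remStates (hm : List (Int × Int × Int)) (start : Int × Int)
    (seen : List (Int × Int × Int × Int)) : Nat :=
  ((PySem.List.dedup (allStates hm start)).filter
    (fun s => !PySem.Set.contains seen s)).length

theorem rem_add_le (hm : List (Int × Int × Int)) (start : Int × Int)
    (seen : List (Int × Int × Int × Int)) (s : Int × Int × Int × Int)
    (hs : s ∈ allStates hm start) (hns : PySem.Set.contains seen s = false) :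
    remStates hm start (PySem.Set.add seen s) + 1 ≤ remStates hm start seen := by
  unfold remStates
  have hfc : (PySem.List.dedup (allStates hm start)).filter
        (fun t => !PySem.Set.contains (PySem.Set.add seen s) t) =
      ((PySem.List.dedup (allStates hm start)).filter
        (fun t => !PySem.Set.contains seen t)).filter (fun t => !(t == s)) := by
    rw [List.filter_filter]
    apply List.filter_congr
    intro t _
    rw [contains_add_eq]
    cases PySem.Set.contains seen t <;> cases hts : (t == s) <;> simp
  rw [hfc]
  have hsF : s ∈ (PySem.List.dedup (allStates hm start)).filter
      (fun t => !PySem.Set.contains seen t) :=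
    List.mem_filter.2 ⟨(PySem.List.mem_dedup _ _).2 hs, by rw [hns]; rfl⟩
  have hlt : ((List.filter (fun t => !PySem.Set.contains seen t)
        (PySem.List.dedup (allStates hm start))).filter (fun t => !(t == s))).length <
      (List.filter (fun t => !PySem.Set.contains seen t)
        (PySem.List.dedup (allStates hm start))).length :=
    List.length_filter_lt_length_iff_exists.2 ⟨s, hsF, by simp⟩
  omega

theorem remStates_le (hm : List (Int × Int × Int)) (start : Int × Int)
    (seen : List (Int × Int × Int × Int)) :
    remStates hm start seen ≤ 1 + 4 * hm.length := by
  unfold remStates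
  refine le_trans (List.length_filter_le _ _) ?_
  rw [PySem.List.dedup_eq_ofList]
  refine le_trans (PySem.Set.length_ofList_le _) ?_
  unfold allStates
  rw [List.length_cons]
  have := flat_bound hm (fun c => dirsAll.map (fun d => (c.1, c.2.1, d.1, d.2))) 4
    (fun d _ => by simp [dirsAll])
  omega

-- definitional one-step reductions of the two loops (used instead of simp-unfolding)
theorem loopA_nil (hm : List (Int × Int × Int)) (end_ : Int × Int) (mn mx : Int)
    (fuel : Nat) (seen : List (Int × Int × Int × Int)) :
    loopA hm end_ mn mx (fuel + 1) [] seen = none := rfl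

theorem loopA_cons (hm : List (Int × Int × Int)) (end_ : Int × Int) (mn mx : Int)
    (fuel : Nat) (hq : Int × Int × Int × Int × Int)
    (tq : List (Int × Int × Int × Int × Int)) (seen : List (Int × Int × Int × Int)) :
    loopA hm end_ mn mx (fuel + 1) (hq :: tq) seen =
      (if ((minTup hq tq).2.1, (minTup hq tq).2.2.1) = end_ then some (minTup hq tq).1
       else if PySem.Set.contains seen ((minTup hq tq).2.1, (minTup hq tq).2.2.1,
           (minTup hq tq).2.2.2.1, (minTup hq tq).2.2.2.2) then
         loopA hm end_ mn mx fuel ((hq :: tq).erase (minTup hq tq)) seen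
       else
         loopA hm end_ mn mx fuel
           ((dirsAll.filter (fun d =>
               !(d == ((minTup hq tq).2.2.2.1, (minTup hq tq).2.2.2.2) ||
                 d == (-(minTup hq tq).2.2.2.1, -(minTup hq tq).2.2.2.2)))).foldl
             (fun qq d => expandA hm mn mx (minTup hq tq).1 (minTup hq tq).2.1
               (minTup hq tq).2.2.1 d.1 d.2 qq) ((hq :: tq).erase (minTup hq tq)))
           (PySem.Set.add seen ((minTup hq tq).2.1, (minTup hq tq).2.2.1,
             (minTup hq tq).2.2.2.1, (minTup hq tq).2.2.2.2))) := rfl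

theorem loopB_succ (hm : List (Int × Int × Int)) (end_ : Int × Int) (mn mx : Int)
    (fuel : Nat) (cand : List (Int × Int × Int × Int × Int))
    (seen : List (Int × Int × Int × Int)) :
    loopB hm end_ mn mx (fuel + 1) cand seen =
      match cand.filter
          (fun e => !PySem.Set.contains seen (e.2.1, e.2.2.1, e.2.2.2.1, e.2.2.2.2)) with
      | [] => none
      | h :: t =>
        if ((minTup h t).2.1, (minTup h t).2.2.1) = end_ then some (minTup h t).1
        else loopB hm end_ mn mx fuel
          (PySem.Set.update cand (succsB hm mn mx (minTup h t)))
          (PySem.Set.add seen ((minTup h t).2.1, (minTup h t).2.2.1,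
            (minTup h t).2.2.2.1, (minTup h t).2.2.2.2)) := rfl

theorem loopB_succ_nil (hm : List (Int × Int × Int)) (end_ : Int × Int) (mn mx : Int)
    (fuel : Nat) (cand : List (Int × Int × Int × Int × Int))
    (seen : List (Int × Int × Int × Int))
    (hF : cand.filter
        (fun e => !PySem.Set.contains seen (e.2.1, e.2.2.1, e.2.2.2.1, e.2.2.2.2)) = []) :
    loopB hm end_ mn mx (fuel + 1) cand seen = none := by
  rw [loopB_succ, hF]

theorem loopB_succ_cons (hm : List (Int × Int × Int)) (end_ : Int × Int) (mn mx : Int)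
    (fuel : Nat) (cand : List (Int × Int × Int × Int × Int))
    (seen : List (Int × Int × Int × Int)) (hf : Int × Int × Int × Int × Int)
    (tf : List (Int × Int × Int × Int × Int))
    (hF : cand.filter
        (fun e => !PySem.Set.contains seen (e.2.1, e.2.2.1, e.2.2.2.1, e.2.2.2.2)) = hf :: tf) :
    loopB hm end_ mn mx (fuel + 1) cand seen =
      (if ((minTup hf tf).2.1, (minTup hf tf).2.2.1) = end_ then some (minTup hf tf).1
       else loopB hm end_ mn mx fuel
         (PySem.Set.update cand (succsB hm mn mx (minTup hf tf)))
         (PySem.Set.add seen ((minTup hf tf).2.1, (minTup hf tf).2.2.1,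
           (minTup hf tf).2.2.2.1, (minTup hf tf).2.2.2.2))) := by
  rw [loopB_succ, hF]

-- the two loops agree: A's queue multiset and B's candidate set present the same frontier
theorem loop_eq (hm : List (Int × Int × Int)) (start end_ : Int × Int) (mn mx : Int) :
    ∀ (fuelA fuelB : Nat) (Q cand : List (Int × Int × Int × Int × Int))
      (seen : List (Int × Int × Int × Int)),
      (∀ e ∈ Q, e ∈ cand) →
      (∀ e ∈ cand,
        PySem.Set.contains seen (e.2.1, e.2.2.1, e.2.2.2.1, e.2.2.2.2) = false → e ∈ Q) →
      (∀ s ∈ seen, (s.1, s.2.1) ≠ end_) →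
      (∀ e ∈ Q, (e.2.1, e.2.2.1, e.2.2.2.1, e.2.2.2.2) ∈ allStates hm start) →
      Q.length + 4 * mx.toNat * remStates hm start seen ≤ fuelA →
      1 + remStates hm start seen ≤ fuelB →
      loopA hm end_ mn mx fuelA Q seen = loopB hm end_ mn mx fuelB cand seen := by
  intro fuelA
  induction fuelA with
  | zero =>
    intro fuelB Q cand seen h1 h2 h3 h4 hfa hfb
    have hQ : Q = [] := by
      cases Q with
      | nil => rfl
      | cons a t => simp [List.length_cons] at hfa
    subst hQ
    obtain ⟨fb, rfl⟩ : ∃ fb, fuelB = fb + 1 := ⟨fuelB - 1, by omega⟩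
    have hF : cand.filter
        (fun e => !PySem.Set.contains seen (e.2.1, e.2.2.1, e.2.2.2.1, e.2.2.2.2)) = [] := by
      rw [List.filter_eq_nil_iff]
      intro e he
      cases hc : PySem.Set.contains seen (e.2.1, e.2.2.1, e.2.2.2.1, e.2.2.2.2) with
      | true => simp [hc]
      | false => exact absurd (h2 e he hc) (by simp)
    rw [loopB_succ_nil hm end_ mn mx fb cand seen hF]
    rfl
  | succ fa ih =>
    intro fuelB Q cand seen h1 h2 h3 h4 hfa hfb
    obtain ⟨fb, rfl⟩ : ∃ fb, fuelB = fb + 1 := ⟨fuelB - 1, by omega⟩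
    cases Q with
    | nil =>
      have hF : cand.filter
          (fun e => !PySem.Set.contains seen (e.2.1, e.2.2.1, e.2.2.2.1, e.2.2.2.2)) = [] := by
        rw [List.filter_eq_nil_iff]
        intro e he
        cases hc : PySem.Set.contains seen (e.2.1, e.2.2.1, e.2.2.2.1, e.2.2.2.2) with
        | true => simp [hc]
        | false => exact absurd (h2 e he hc) (by simp)
      rw [loopA_nil, loopB_succ_nil hm end_ mn mx fb cand seen hF]
    | cons hq tq =>
      have hmQ : minTup hq tq ∈ hq :: tq := minTup_mem hq tq
      have hminle : ∀ z ∈ hq :: tq, tupLt z (minTup hq tq) = false := minTup_le hq tq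
      set m := minTup hq tq with hm_def
      by_cases hseenm :
          PySem.Set.contains seen (m.2.1, m.2.2.1, m.2.2.2.1, m.2.2.2.2) = true
      · -- stutter: A pops a seen-state entry and discards it; B's side is unchanged
        have hnotend : ¬ (m.2.1, m.2.2.1) = end_ := by
          intro he
          exact h3 _ ((PySem.Set.contains_iff _ _).1 hseenm) he
        have hred : loopA hm end_ mn mx (fa + 1) (hq :: tq) seen =
            loopA hm end_ mn mx fa ((hq :: tq).erase m) seen := by
          rw [loopA_cons, ← hm_def, if_neg hnotend, if_pos hseenm]
        rw [hred]
        refine ih (fb + 1) ((hq :: tq).erase m) cand seen ?_ ?_ h3 ?_ ?_ hfb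
        · exact fun e he => h1 e (List.mem_of_mem_erase he)
        · intro e he hc
          have heQ : e ∈ hq :: tq := h2 e he hc
          have hne : e ≠ m := by
            intro h; rw [h] at hc; rw [hc] at hseenm; exact absurd hseenm (by simp)
          exact (List.mem_erase_of_ne hne).2 heQ
        · exact fun e he => h4 e (List.mem_of_mem_erase he)
        · have := List.length_erase_of_mem hmQ
          have hlen : (hq :: tq).length = tq.length + 1 := by simp
          omega
      · -- m's state is unseen: it is the minimum of B's frontier as well
        have hseenm' :
            PySem.Set.contains seen (m.2.1, m.2.2.1, m.2.2.2.1, m.2.2.2.2) = false := by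
          simpa using hseenm
        have hmF : m ∈ cand.filter
            (fun e => !PySem.Set.contains seen (e.2.1, e.2.2.1, e.2.2.2.1, e.2.2.2.2)) :=
          List.mem_filter.2 ⟨h1 m hmQ, by rw [hseenm']; rfl⟩
        cases hF : cand.filter
            (fun e => !PySem.Set.contains seen (e.2.1, e.2.2.1, e.2.2.2.1, e.2.2.2.2)) with
        | nil => rw [hF] at hmF; cases hmF
        | cons hf tf =>
          rw [hF] at hmF
          have hFsub : ∀ z ∈ hf :: tf, tupLt z m = false := by
            intro z hz
            rw [← hF] at hz
            have hz' := List.mem_filter.1 hz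
            exact hminle z (h2 z hz'.1 (by simpa using hz'.2))
          have hminF : minTup hf tf = m := minTup_eq hmF hFsub
          by_cases hend : (m.2.1, m.2.2.1) = end_
          · -- both return m's heat
            have hA : loopA hm end_ mn mx (fa + 1) (hq :: tq) seen = some m.1 := by
              rw [loopA_cons, ← hm_def, if_pos hend]
            have hB : loopB hm end_ mn mx (fb + 1) cand seen = some m.1 := by
              rw [loopB_succ_cons hm end_ mn mx fb cand seen hf tf hF, hminF, if_pos hend]
            rw [hA, hB]
          · -- both expand m
            have hA : loopA hm end_ mn mx (fa + 1) (hq :: tq) seen =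
                loopA hm end_ mn mx fa
                  (((hq :: tq).erase m) ++
                    ((dirsAll.filter (fun d =>
                        !(d == (m.2.2.2.1, m.2.2.2.2) || d == (-m.2.2.2.1, -m.2.2.2.2)))).flatMap
                      (fun d => entriesB hm mn mx m.1 m.2.1 m.2.2.1 d.1 d.2)))
                  (PySem.Set.add seen (m.2.1, m.2.2.1, m.2.2.2.1, m.2.2.2.2)) := by
              rw [loopA_cons, ← hm_def, if_neg hend,
                if_neg (by rw [hseenm']; simp), foldl_expandA]
            have hB : loopB hm end_ mn mx (fb + 1) cand seen =
                loopB hm end_ mn mx fb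
                  (PySem.Set.update cand (succsB hm mn mx m))
                  (PySem.Set.add seen (m.2.1, m.2.2.1, m.2.2.2.1, m.2.2.2.2)) := by
              rw [loopB_succ_cons hm end_ mn mx fb cand seen hf tf hF, hminF, if_neg hend]
            rw [hA, hB]
            set new := (dirsAll.filter (fun d =>
                !(d == (m.2.2.2.1, m.2.2.2.2) || d == (-m.2.2.2.1, -m.2.2.2.2)))).flatMap
              (fun d => entriesB hm mn mx m.1 m.2.1 m.2.2.1 d.1 d.2) with hnew_def
            have hnewmem : ∀ e ∈ new,
                (hmGet? hm e.2.1 e.2.2.1).isSome = true ∧ (e.2.2.2.1, e.2.2.2.2) ∈ dirsAll := by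
              intro e he
              rw [hnew_def, List.mem_flatMap] at he
              obtain ⟨d, hd, hed⟩ := he
              obtain ⟨d1, d2⟩ := d
              have hd' : (d1, d2) ∈ dirsAll := (List.mem_filter.1 hd).1
              obtain ⟨hsome, hdir⟩ := mem_entriesB hed
              refine ⟨hsome, ?_⟩
              have he2 : (e.2.2.2.1, e.2.2.2.2) = (d1, d2) := by rw [← hdir]
              rw [he2]; exact hd'
            refine ih fb (((hq :: tq).erase m) ++ new)
              (PySem.Set.update cand (succsB hm mn mx m))
              (PySem.Set.add seen (m.2.1, m.2.2.1, m.2.2.2.1, m.2.2.2.2)) ?_ ?_ ?_ ?_ ?_ ?_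
            · intro e he
              rcases List.mem_append.1 he with he' | he'
              · exact (PySem.Set.mem_update _ _ _).2 (Or.inl (h1 e (List.mem_of_mem_erase he')))
              · refine (PySem.Set.mem_update _ _ _).2 (Or.inr ?_)
                rw [succsB_eq, ← hnew_def]
                exact he'
            · intro e he hc
              rw [contains_add_eq] at hc
              have hc1 : PySem.Set.contains seen (e.2.1, e.2.2.1, e.2.2.2.1, e.2.2.2.2) = false := by
                cases hx : PySem.Set.contains seen (e.2.1, e.2.2.1, e.2.2.2.1, e.2.2.2.2) with
                | false => rfl
                | true => rw [hx] at hc; simp at hc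
              have hc2 : ((e.2.1, e.2.2.1, e.2.2.2.1, e.2.2.2.2) ==
                  (m.2.1, m.2.2.1, m.2.2.2.1, m.2.2.2.2)) = false := by
                cases hx : ((e.2.1, e.2.2.1, e.2.2.2.1, e.2.2.2.2) ==
                    (m.2.1, m.2.2.1, m.2.2.2.1, m.2.2.2.2)) with
                | false => rfl
                | true => rw [hx] at hc; simp at hc
              rcases (PySem.Set.mem_update _ _ _).1 he with he' | he'
              · have heQ : e ∈ hq :: tq := h2 e he' hc1
                have hne : e ≠ m := by
                  intro h
                  rw [h] at hc2
                  simp at hc2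
                exact List.mem_append.2 (Or.inl ((List.mem_erase_of_ne hne).2 heQ))
              · refine List.mem_append.2 (Or.inr ?_)
                rw [hnew_def, ← succsB_eq]
                exact he'
            · intro s hs
              rcases (PySem.Set.mem_add _ _ _).1 hs with hs' | hs'
              · exact h3 s hs'
              · subst hs'; exact hend
            · intro e he
              rcases List.mem_append.1 he with he' | he'
              · exact h4 e (List.mem_of_mem_erase he')
              · obtain ⟨hsome, hdir⟩ := hnewmem e he'
                obtain ⟨v, hv⟩ := Option.isSome_iff_exists.1 hsome
                exact state_mem_allStates start hv hdir
            · have hlen_new : new.length ≤ 4 * mx.toNat := by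
                rw [hnew_def]
                refine le_trans (flat_bound _ _ mx.toNat
                  (fun d _ => length_entriesB_le hm mn mx m.1 m.2.1 m.2.2.1 d.1 d.2)) ?_
                have hd4 : (dirsAll.filter (fun d =>
                    !(d == (m.2.2.2.1, m.2.2.2.2) || d == (-m.2.2.2.1, -m.2.2.2.2)))).length ≤ 4 := by
                  refine le_trans (List.length_filter_le _ _) ?_
                  simp [dirsAll]
                exact Nat.mul_le_mul_right _ hd4
              have hrem := rem_add_le hm start seen (m.2.1, m.2.2.1, m.2.2.2.1, m.2.2.2.2)
                (h4 m hmQ) hseenm'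
              have hmul := Nat.mul_le_mul_left (4 * mx.toNat) hrem
              rw [Nat.mul_add, Nat.mul_one] at hmul
              have herase := List.length_erase_of_mem hmQ
              rw [List.length_append]
              have hlen : (hq :: tq).length = tq.length + 1 := by simp
              omega
            · have hrem := rem_add_le hm start seen (m.2.1, m.2.2.1, m.2.2.2.1, m.2.2.2.2)
                (h4 m hmQ) hseenm'
              omega

-- ===== VERDICT (by name: the statement is the Claim_ definition above) =====
theorem heat_loss_spec : Claim_equal_heat_loss := by
  unfold Claim_equal_heat_loss Spec_heat_loss
  intro heat_map start end_ min_move max_move _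
  unfold heat_loss heat_loss_alt
  refine loop_eq heat_map start end_ min_move max_move _ _ _ _ _ ?_ ?_ ?_ ?_ ?_ ?_
  · intro e he
    exact (PySem.Set.mem_ofList _ _).2 he
  · intro e he _
    exact (PySem.Set.mem_ofList _ _).1 he
  · intro s hs
    cases hs
  · intro e he
    have : e = (0, start.1, start.2, 0, 0) := by simpa using he
    subst this
    exact List.mem_cons_self
  · have hr := remStates_le heat_map start PySem.Set.empty
    have hmul := Nat.mul_le_mul_left (4 * max_move.toNat) hr
    have hc : 4 * max_move.toNat * (1 + 4 * heat_map.length) =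
        (1 + 4 * heat_map.length) * (4 * max_move.toNat) := Nat.mul_comm _ _
    rw [hc] at hmul
    simp only [pvFuel, List.length_cons, List.length_nil]
    omega
  · have hr := remStates_le heat_map start PySem.Set.empty
    simp only [pvFuel]
    omega
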